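-- pv_equiv track=rewrite | github.com/Rashxv/clinc150-intent-tinker | scripts/model_compare_demo_updated.py | choose_few_shot_examples
-- ===== SOURCE A (Python) =====
-- from collections import defaultdict
--
-- def group_examples_by_label(rows: list[dict]) -> dict[str, list[dict]]:
--     grouped: dict[str, list[dict]] = defaultdict(list)
--     for row in rows:
--         label = row.get("meta", {}).get("label", "").strip()
--         if label:
--             grouped[label].append(row)
--     return grouped
--
-- def choose_few_shot_examples(train_rows: list[dict], max_examples: int = 4) -> list[dict]:
--     grouped = group_examples_by_label(train_rows)
--     labels = sorted(grouped.keys())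
--
--     support = []
--     label_idx = 0
--
--     while len(support) < max_examples and labels:
--         label = labels[label_idx % len(labels)]
--         examples = grouped[label]
--         take_idx = label_idx // len(labels)
--
--         if take_idx < len(examples):
--             support.append(examples[take_idx])
--
--         label_idx += 1
--
--         if label_idx > len(labels) * max(len(v) for v in grouped.values()):
--             break
--
--     return support[:max_examples]
-- ===== SOURCE B (Python) =====
-- from itertools import zip_longest
--
--
-- def group_examples_by_label(rows: list[dict]) -> dict[str, list[dict]]:
--     grouped: dict[str, list[dict]] = {}
--     for row in rows:
--         label = row.get("meta", {}).get("label", "").strip()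
--         if label:
--             grouped.setdefault(label, []).append(row)
--     return grouped
--
--
-- def choose_few_shot_examples(train_rows: list[dict], max_examples: int = 4) -> list[dict]:
--     grouped = group_examples_by_label(train_rows)
--     lists = [grouped[label] for label in sorted(grouped)]
--     # zip_longest transposes: each tuple is one round across all labels (None fills
--     # short columns; rows are dicts, never None, so filtering None is safe).
--     interleaved = [ex for rnd in zip_longest(*lists) for ex in rnd if ex is not None]
--     return interleaved[:max(0, max_examples)]
-- ===== Notes on version B (the rewrite author's own statement) =====
-- stated objective: alternative
-- what changed: Replaces A's modular-index while loop (with budget check, per-step index arithmetic and an overshoot-break guard) by a build-then-slice decomposition: transpose the sorted per-label lists with itertools.zip_longest, flatten the rounds dropping the None fill, and slice the first max_examples.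
import Mathlib
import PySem

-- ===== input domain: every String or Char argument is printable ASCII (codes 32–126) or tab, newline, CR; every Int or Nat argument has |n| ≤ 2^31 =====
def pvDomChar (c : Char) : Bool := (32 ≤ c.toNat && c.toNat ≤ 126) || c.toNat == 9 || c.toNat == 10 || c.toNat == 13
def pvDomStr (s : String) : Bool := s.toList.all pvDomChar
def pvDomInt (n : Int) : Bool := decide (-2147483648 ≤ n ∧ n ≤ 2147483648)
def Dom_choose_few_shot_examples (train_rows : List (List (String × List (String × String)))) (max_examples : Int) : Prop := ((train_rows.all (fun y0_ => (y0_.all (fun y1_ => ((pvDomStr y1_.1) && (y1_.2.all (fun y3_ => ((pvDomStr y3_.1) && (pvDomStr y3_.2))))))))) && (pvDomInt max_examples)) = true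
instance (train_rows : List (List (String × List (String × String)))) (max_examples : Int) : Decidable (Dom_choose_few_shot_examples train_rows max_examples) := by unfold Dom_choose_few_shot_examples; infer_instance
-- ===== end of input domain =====

-- B re-implements the round-robin selection by transposing the per-label lists
-- (zip_longest-style rounds) and slicing, instead of A's modular-index while loop;
-- objective: alternative decomposition, same result.

abbrev pvRow : Type := List (String × List (String × String))

-- shared helper: transliteration of group_examples_by_label (used verbatim by both Pythons)
def pvGroup (rows : List pvRow) : PySem.Dict String (List pvRow) :=
  rows.foldl (fun grouped row =>
    let label := PySem.Str.strip
      (PySem.Dict.getD (PySem.Dict.mk (PySem.Dict.getD (PySem.Dict.mk row) "meta" [])) "label" "")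
    if label ≠ "" then grouped.modify label [] (fun v => v ++ [row]) else grouped)
    PySem.Dict.empty

-- ===== PORT A =====
-- max(len(v) for v in grouped.values()): Python raises on an empty dict, but A only
-- evaluates it when labels is nonempty, so the fold's 0 seed is never the result there.
def pvMaxLen (vs : List (List pvRow)) : Nat := (vs.map List.length).foldl max 0

-- A's while loop; fuel = len(labels)*maxlen + 1 bounds the iterations (the loop breaks
-- once label_idx exceeds len(labels)*maxlen), so the fuel is never exhausted.
def pvLoopA (labels : List String) (grouped : PySem.Dict String (List pvRow))
    (max_examples : Int) : Nat → List pvRow → Nat → List pvRow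
  | 0, support, _ => support
  | fuel+1, support, label_idx =>
    if (support.length : Int) < max_examples ∧ labels ≠ [] then
      let label := labels.getD (label_idx % labels.length) ""   -- index < len, getD exact
      let examples := grouped.getD label []
      let take_idx := label_idx / labels.length
      let support' := if take_idx < examples.length then support ++ [examples.getD take_idx []] else support
      if labels.length * pvMaxLen grouped.values < label_idx + 1 then support'
      else pvLoopA labels grouped max_examples fuel support' (label_idx + 1)
    else support

def choose_few_shot_examples (train_rows : List (List (String × List (String × String)))) (max_examples : Int) : List (List (String × List (String × String))) :=
  let grouped := pvGroup train_rows
  let labels := PySem.List.sorted grouped.keys (fun x => x) false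
  PySem.List.slice
    (pvLoopA labels grouped max_examples (labels.length * pvMaxLen grouped.values + 1) [] 0)
    none (some max_examples)

-- ===== PORT B =====
def choose_few_shot_examples_alt (train_rows : List (List (String × List (String × String)))) (max_examples : Int) : List (List (String × List (String × String))) :=
  let grouped := pvGroup train_rows
  let lists := (PySem.List.sorted grouped.keys (fun x => x) false).map
    (fun label => grouped.getD label [])
  -- zip_longest(*lists) yields max-length rounds; dropping the None fill leaves,
  -- per round t, exactly the elements lists[i][t] that exist.
  let interleaved := (List.range ((lists.map List.length).foldl max 0)).flatMap
    (fun t => lists.filterMap (fun ex => ex[t]?))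
  interleaved.take (max 0 max_examples).toNat   -- interleaved[:max(0, max_examples)]

-- ===== PRECONDITION & SPEC =====
def Spec_choose_few_shot_examples (train_rows : List (List (String × List (String × String)))) (max_examples : Int) (out : List (List (String × List (String × String)))) : Prop := out = choose_few_shot_examples_alt train_rows max_examples
instance (train_rows : List (List (String × List (String × String)))) (max_examples : Int) (out : List (List (String × List (String × String)))) : Decidable (Spec_choose_few_shot_examples train_rows max_examples out) := by unfold Spec_choose_few_shot_examples; infer_instance

-- ===== CLAIM (what is proved, stated in full; the proofs are below) =====
def Claim_equal_choose_few_shot_examples : Prop := ∀ (train_rows : List (List (String × List (String × String)))) (max_examples : Int), Dom_choose_few_shot_examples train_rows max_examples → Spec_choose_few_shot_examples train_rows max_examples (choose_few_shot_examples train_rows max_examples)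

-- ===== LEMMAS AND PROOFS =====

-- the element A's loop emits at step j
def pvE (labels : List String) (grouped : PySem.Dict String (List pvRow)) (j : Nat) : Option pvRow :=
  (grouped.getD (labels.getD (j % labels.length) "") [])[j / labels.length]?

lemma slice_nil {α : Type} (a b : Option Int) : PySem.List.slice ([] : List α) a b = [] := by
  rw [List.eq_nil_iff_forall_not_mem]
  intro x hx
  simpa using PySem.List.mem_of_mem_slice [] a b hx

-- A's loop, characterised: from step k it appends the stream of surviving round-robin
-- picks for indices k … len*maxlen, truncated to the remaining budget.
lemma loopA_eq (labels : List String) (grouped : PySem.Dict String (List pvRow)) (n : Int)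
    (hL : labels ≠ []) :
    ∀ fuel k s, k ≤ labels.length * pvMaxLen grouped.values →
      labels.length * pvMaxLen grouped.values + 1 - k ≤ fuel →
      pvLoopA labels grouped n fuel s k =
        s ++ ((List.range' k (labels.length * pvMaxLen grouped.values + 1 - k)).filterMap
          (pvE labels grouped)).take (n - s.length).toNat := by
  intro fuel
  induction fuel with
  | zero => intro k s hk hf; omega
  | succ fuel ih =>
    intro k s hk hf
    rw [pvLoopA]
    by_cases hlt : (s.length : Int) < n
    · simp only [hlt, hL, true_and, ne_eq, not_false_iff, if_true]
      have hrange : labels.length * pvMaxLen grouped.values + 1 - k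
          = (labels.length * pvMaxLen grouped.values - k) + 1 := by omega
      have hcons : (List.range' k (labels.length * pvMaxLen grouped.values + 1 - k)).filterMap (pvE labels grouped)
          = (match pvE labels grouped k with
             | some x => x :: (List.range' (k+1) (labels.length * pvMaxLen grouped.values - k)).filterMap (pvE labels grouped)
             | none => (List.range' (k+1) (labels.length * pvMaxLen grouped.values - k)).filterMap (pvE labels grouped)) := by
        rw [hrange, List.range'_succ, List.filterMap_cons]
        cases pvE labels grouped k <;> rfl
      have hEmatch : (if k / labels.length < (grouped.getD (labels.getD (k % labels.length) "") []).length
            then s ++ [(grouped.getD (labels.getD (k % labels.length) "") []).getD (k / labels.length) []] else s)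
          = s ++ (match pvE labels grouped k with
                  | some x => [x] | none => []) := by
        unfold pvE
        rcases hE : (grouped.getD (labels.getD (k % labels.length) "") [])[k / labels.length]? with _ | x
        · rw [List.getElem?_eq_none_iff] at hE
          rw [if_neg (by omega)]
          simp
        · obtain ⟨hidx, -⟩ := List.getElem?_eq_some_iff.mp hE
          rw [if_pos hidx]
          simp only [List.getD_eq_getElem?_getD] at hE ⊢
          rw [hE]
          rfl
      rw [hcons, hEmatch]
      by_cases hbreak : labels.length * pvMaxLen grouped.values < k + 1
      · have h0 : labels.length * pvMaxLen grouped.values - k = 0 := by omega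
        rw [if_pos hbreak, h0]
        cases hE : pvE labels grouped k
        · simp [List.range']
        · simp only [List.range'_zero, List.filterMap_nil]
          rw [List.take_of_length_le (by simp; omega)]
      · rw [if_neg hbreak]
        cases hE : pvE labels grouped k with
        | none =>
          rw [ih (k+1) _ (by omega) (by omega),
            show labels.length * pvMaxLen grouped.values + 1 - (k + 1)
              = labels.length * pvMaxLen grouped.values - k from by omega]
          simp
        | some x =>
          rw [ih (k+1) _ (by omega) (by omega),
            show labels.length * pvMaxLen grouped.values + 1 - (k + 1)
              = labels.length * pvMaxLen grouped.values - k from by omega,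
            show (n - (s.length : Int)).toNat = (n - (((s ++ [x]).length : Nat) : Int)).toNat + 1 from
              by simp; omega,
            List.take_succ_cons, List.append_assoc]
          simp
    · rw [if_neg (by tauto)]
      have h0 : (n - (s.length : Int)).toNat = 0 := by omega
      simp [h0]

lemma filterMap_range_getD {α β : Type} (l : List α) (g : α → Option β) (d0 : α) :
    (List.range l.length).filterMap (fun i => g (l.getD i d0)) = l.filterMap g := by
  induction l with
  | nil => simp
  | cons a tl ih =>
    simp only [List.length_cons, List.range_succ_eq_map, List.filterMap_cons, List.filterMap_map]
    simp only [List.getD_cons_zero, List.getD_cons_succ, Function.comp_def]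
    cases h : g a <;> simp [← ih]

-- the first len*M round-robin picks, reorganised into M rounds of len picks (B's rounds)
lemma blocks_eq (lists : List (List pvRow)) (hL : 0 < lists.length) (M : Nat) :
    (List.range (lists.length * M)).filterMap
      (fun j => (lists.getD (j % lists.length) [])[j / lists.length]?)
    = (List.range M).flatMap (fun t => lists.filterMap (fun ex => ex[t]?)) := by
  induction M with
  | zero => simp
  | succ m ih =>
    rw [Nat.mul_succ, List.range_add, List.filterMap_append, ih, List.range_succ,
      List.flatMap_append, List.filterMap_map]
    congr 1
    simp only [List.flatMap_cons, List.flatMap_nil, List.append_nil, Function.comp_def]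
    rw [← filterMap_range_getD lists (fun ex => ex[m]?) []]
    apply List.filterMap_congr
    intro i hi
    have hiL : i < lists.length := by simpa using hi
    rw [Nat.mul_add_mod, Nat.mod_eq_of_lt hiL, Nat.mul_add_div hL, Nat.div_eq_of_lt hiL,
      Nat.add_zero]

-- index len*M (A's one overshoot step before the break) emits nothing
lemma stream_full (lists : List (List pvRow)) (hL : 0 < lists.length) (M : Nat)
    (hlen : ∀ x ∈ lists, x.length ≤ M) :
    (List.range (lists.length * M + 1)).filterMap
      (fun j => (lists.getD (j % lists.length) [])[j / lists.length]?)
    = (List.range (lists.length * M)).filterMap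
      (fun j => (lists.getD (j % lists.length) [])[j / lists.length]?) := by
  rw [List.range_succ, List.filterMap_append]
  have h1 : (lists.length * M) % lists.length = 0 := Nat.mul_mod_right _ _
  have h2 : (lists.length * M) / lists.length = M := by
    rw [Nat.mul_div_cancel_left _ hL]
  have hmem : lists.getD 0 [] ∈ lists := by
    rw [List.getD_eq_getElem _ _ hL]; exact List.getElem_mem _
  have hnone : (lists.getD 0 [])[M]? = (none : Option pvRow) :=
    List.getElem?_eq_none (hlen _ hmem)
  simp only [List.filterMap_cons, List.filterMap_nil, h1, h2, hnone, List.append_nil]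

lemma pvE_eq (labels : List String) (grouped : PySem.Dict String (List pvRow))
    (hL : 0 < labels.length) (j : Nat) :
    pvE labels grouped j
    = (((labels.map (fun l => grouped.getD l [])).getD (j % labels.length) []))[j / labels.length]? := by
  have hj : j % labels.length < labels.length := Nat.mod_lt _ hL
  unfold pvE
  rw [List.getD_eq_getElem _ _ hj, List.getD_eq_getElem _ _ (by simpa using hj), List.getElem_map]

lemma nodup_step (d : PySem.Dict String (List pvRow)) (k : String) (f : List pvRow → List pvRow)
    (h : d.keys.Nodup) : (d.modify k [] f).keys.Nodup := by
  rw [PySem.Dict.keys_modify]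
  rcases hc : d.contains k with _|_
  · rw [PySem.Dict.keys_insert_of_not_contains _ _ hc]
    refine List.Nodup.append h (List.nodup_singleton _) ?_
    intro x hx hy; simp at hy; subst hy
    simp [((PySem.Dict.contains_iff_mem_keys _ _).2 hx)] at hc
  · rw [PySem.Dict.keys_insert_of_contains _ _ hc]; exact h

lemma nodup_keys_pvGroup (rows : List pvRow) : (pvGroup rows).keys.Nodup := by
  unfold pvGroup
  suffices h : ∀ (d : PySem.Dict String (List pvRow)), d.keys.Nodup →
      (rows.foldl (fun grouped row =>
        let label := PySem.Str.strip
          (PySem.Dict.getD (PySem.Dict.mk (PySem.Dict.getD (PySem.Dict.mk row) "meta" [])) "label" "")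
        if label ≠ "" then grouped.modify label [] (fun v => v ++ [row]) else grouped) d).keys.Nodup by
    exact h _ PySem.Dict.nodup_keys_empty
  induction rows with
  | nil => intro d hd; simpa using hd
  | cons r rs ih =>
    intro d hd
    rw [List.foldl_cons]
    apply ih
    dsimp only
    split_ifs with h
    · exact nodup_step _ _ _ hd
    · exact hd

lemma maxlen_perm (xs ys : List (List pvRow)) (h : xs.Perm ys) :
    (xs.map List.length).foldl max 0 = (ys.map List.length).foldl max 0 := by
  haveI : RightCommutative (max : Nat → Nat → Nat) := ⟨fun a b c => by omega⟩
  exact (h.map List.length).foldl_eq 0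

-- ===== VERDICT (by name: the statement is the Claim_ definition above) =====
theorem choose_few_shot_examples_spec : Claim_equal_choose_few_shot_examples := by
  intro rows n _
  unfold Spec_choose_few_shot_examples
  simp only [choose_few_shot_examples, choose_few_shot_examples_alt]
  set grouped := pvGroup rows with hg
  set labels := PySem.List.sorted grouped.keys (fun x => x) false with hlabels
  by_cases hlab : labels = []
  · rw [hlab]
    simp [pvLoopA, slice_nil]
  · have hL : 0 < labels.length := List.length_pos_of_ne_nil hlab
    have hnd : grouped.keys.Nodup := nodup_keys_pvGroup rows
    have hperm : (labels.map (fun l => grouped.getD l [])).Perm grouped.values := by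
      rw [PySem.Dict.values_eq_map_keys grouped hnd []]
      exact (PySem.List.sorted_perm _ _ _).map _
    have hM : ((labels.map (fun l => grouped.getD l [])).map List.length).foldl max 0
        = pvMaxLen grouped.values := maxlen_perm _ _ hperm
    have hlen : ∀ x ∈ labels.map (fun l => grouped.getD l []),
        x.length ≤ pvMaxLen grouped.values := by
      intro x hx
      have h2 := (PySem.List.le_foldl_max ((labels.map (fun l => grouped.getD l [])).map List.length) 0).2
        x.length (List.mem_map_of_mem hx)
      rwa [hM] at h2
    have hlistlen : labels.length = (labels.map (fun l => grouped.getD l [])).length := by simp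
    have hloop := loopA_eq labels grouped n hlab
      (labels.length * pvMaxLen grouped.values + 1) 0 [] (Nat.zero_le _) (by omega)
    simp only [Nat.sub_zero] at hloop
    rw [hloop]
    simp only [List.nil_append, List.length_nil, Nat.cast_zero, sub_zero]
    rw [← List.range_eq_range',
      List.filterMap_congr (fun j _ => pvE_eq labels grouped hL j)]
    rw [hlistlen] at *
    rw [stream_full _ (by simpa using hL) _ hlen, blocks_eq _ (by simpa using hL), hM]
    have hmax : (max 0 n).toNat = n.toNat := by omega
    rw [hmax]
    by_cases hn : 0 ≤ n
    · rw [PySem.List.slice_to _ hn, List.take_take, min_self]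
    · have h0 : n.toNat = 0 := by omega
      simp [h0, slice_nil]
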